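-- pv_equiv track=rewrite | github.com/ananastatique/TIPE | modelisation_quartier_15.py | avancer
-- ===== SOURCE A (Python) =====
-- def avancer(L1, b) :
--     """ Fait avancer toutes la file et partir la dernière voiture
--     b = {0,1} qui fait venir une dernière voiture """
--     L = L1.copy()
--     n = len(L)
--     L[n-1] = 0
--     for i in range(n-2,-1,-1) :
--         if not(L[i+1]):
--             L[i+1] = L[i]
--             L[i] = 0
--     if b :
--         L[0] = 1
--     return L
-- ===== SOURCE B (Python) =====
-- def avancer(L1, b):
--     """ Fait avancer toutes la file et partir la derniere voiture
--     b = {0,1} qui fait venir une derniere voiture """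
--     L = L1.copy()
--     L.pop()
--     L.insert(0, 1 if b else 0)
--     return L
-- ===== Notes on version B (the rewrite author's own statement) =====
-- stated objective: simpler
-- what changed: The backward shifting loop's guard is always true, so the whole step is a right-shift: B drops the last element with pop() and prepends the new front cell with insert(0, 1 if b else 0), with no loop and no conditional shifting.
import Mathlib
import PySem

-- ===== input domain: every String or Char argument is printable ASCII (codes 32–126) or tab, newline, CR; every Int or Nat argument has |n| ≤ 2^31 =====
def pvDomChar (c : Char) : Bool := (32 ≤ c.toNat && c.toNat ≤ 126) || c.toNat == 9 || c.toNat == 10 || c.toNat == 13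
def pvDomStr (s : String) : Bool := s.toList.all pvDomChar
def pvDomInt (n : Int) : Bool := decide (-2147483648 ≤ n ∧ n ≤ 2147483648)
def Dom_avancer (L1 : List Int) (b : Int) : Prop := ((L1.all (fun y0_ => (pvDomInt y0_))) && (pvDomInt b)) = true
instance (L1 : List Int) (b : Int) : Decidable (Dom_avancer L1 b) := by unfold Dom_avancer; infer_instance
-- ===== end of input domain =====

-- B replaces A's guarded backward shifting loop (the guard is always true) by pop() + insert(0, new front): simpler, no loop and no conditional.

-- ===== PORT A =====
-- Literal port of A: set last cell to 0, then shift backwards with the guarded loop,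
-- then set the front cell to 1 if b is truthy.
def avancerStep (L : List Int) (i : Int) : List Int :=
  if PySem.List.pyGetD L (i + 1) 0 = 0 then
    PySem.List.pySetD (PySem.List.pySetD L (i + 1) (PySem.List.pyGetD L i 0)) i 0
  else L

def avancer (L1 : List Int) (b : Int) : List Int :=
  let L := L1
  let n : Int := L.length
  let L := PySem.List.pySetD L (n - 1) 0
  let L := (PySem.List.pyRange (n - 2) (-1) (-1)).foldl avancerStep L
  if b ≠ 0 then PySem.List.pySetD L 0 1 else L

-- ===== PORT B =====
-- B: pop the last element, insert the new front element; one line per Python statement.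
def avancer_alt (L1 : List Int) (b : Int) : List Int :=
  match PySem.List.pop? L1 (-1) with
  | none => []   -- L.pop() raises IndexError on the empty list; excluded by Pre_
  | some (_, L) => PySem.List.insert L 0 (if b ≠ 0 then 1 else 0)

-- ===== PRECONDITION & SPEC =====
-- A raises IndexError on the empty list (L[n-1] with n = 0); B's pop() raises there too.
def Pre_avancer (L1 : List Int) (b : Int) : Prop := L1 ≠ []
instance (L1 : List Int) (b : Int) : Decidable (Pre_avancer L1 b) := by unfold Pre_avancer; infer_instance
def pvWitness_avancer : List Int × Int := ([3, 1, 4, 1], 1)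

def Spec_avancer (L1 : List Int) (b : Int) (out : List Int) : Prop := out = avancer_alt L1 b
instance (L1 : List Int) (b : Int) (out : List Int) : Decidable (Spec_avancer L1 b out) := by unfold Spec_avancer; infer_instance

-- ===== CLAIM (what is proved, stated in full; the proofs are below) =====
def Claim_equal_avancer : Prop := ∀ (L1 : List Int) (b : Int), Dom_avancer L1 b → Pre_avancer L1 b → Spec_avancer L1 b (avancer L1 b)

-- ===== LEMMAS AND PROOFS =====

-- The backward loop, started on F ++ 0 :: back with indices |F|-1 down to 0, shifts F one cell right.
lemma avancer_loop_shift (F back : List Int) :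
    (PySem.List.pyRange ((F.length : Int) - 1) (-1) (-1)).foldl avancerStep (F ++ 0 :: back)
      = 0 :: (F ++ back) := by
  induction F using List.reverseRecOn generalizing back with
  | nil => simp [PySem.List.pyRange_neg_one_eq_nil]
  | append_singleton F' x ih =>
    have hlen : ((F' ++ [x]).length : Int) - 1 = (F'.length : Int) := by
      simp
    rw [hlen, PySem.List.pyRange_neg_one_cons (by omega), List.foldl_cons]
    have hstate : (F' ++ [x]) ++ 0 :: back = F' ++ x :: 0 :: back := by simp
    have hget1 : PySem.List.pyGetD (F' ++ x :: 0 :: back) ((F'.length : Int) + 1) 0 = 0 := by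
      have : ((F'.length : Int) + 1) = ((F'.length + 1 : Nat) : Int) := by push_cast; ring
      rw [this, PySem.List.pyGetD_natCast]
      simp [List.getD, List.getElem?_append_right]
    have hget0 : PySem.List.pyGetD (F' ++ x :: 0 :: back) ((F'.length : Int)) 0 = x := by
      rw [PySem.List.pyGetD_natCast]
      simp [List.getD, List.getElem?_append_right]
    have hstep : avancerStep ((F' ++ [x]) ++ 0 :: back) (F'.length : Int)
        = F' ++ 0 :: x :: back := by
      rw [hstate]
      unfold avancerStep
      rw [hget1, if_pos rfl, hget0]
      have h1 : ((F'.length : Int) + 1) = ((F'.length + 1 : Nat) : Int) := by push_cast; ring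
      rw [h1, PySem.List.pySetD_natCast, PySem.List.pySetD_natCast]
      rw [show F' ++ x :: 0 :: back = F' ++ [x] ++ 0 :: back by simp,
          List.set_append_right _ _ (by simp)]
      simp [List.set_append]
    rw [hstep, ih (x :: back)]
    simp

lemma avancer_setLast (F : List Int) (x : Int) :
    PySem.List.pySetD (F ++ [x]) ((F.length : Int)) 0 = F ++ 0 :: [] := by
  rw [PySem.List.pySetD_natCast]
  simp [List.set_append]

lemma avancer_pop_last (F : List Int) (x : Int) :
    PySem.List.pop? (F ++ [x]) (-1) = some (x, F) := by
  exact PySem.List.pop?_last F x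

lemma avancer_insert_zero (F : List Int) (v : Int) :
    PySem.List.insert F 0 v = v :: F := by
  simp [PySem.List.insert, PySem.List.sliceIndices]

-- ===== VERDICT (by name: the statement is the Claim_ definition above) =====
theorem avancer_spec : Claim_equal_avancer := by
  unfold Claim_equal_avancer
  intro L1 b _ hne
  obtain ⟨F, x, rfl⟩ : ∃ F x, L1 = F ++ [x] :=
    ⟨L1.dropLast, L1.getLast hne, (List.dropLast_concat_getLast hne).symm⟩
  unfold Spec_avancer avancer avancer_alt
  rw [avancer_pop_last]
  have h1 : ((F ++ [x]).length : Int) - 1 = (F.length : Int) := by simp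
  have h2 : ((F ++ [x]).length : Int) - 2 = (F.length : Int) - 1 := by
    simp; ring
  simp only [h1, h2, avancer_setLast, avancer_loop_shift F [], avancer_insert_zero]
  split_ifs with hb
  · rw [show (0:Int) = ((0:Nat):Int) by simp, PySem.List.pySetD_natCast]
    simp
  · simp
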